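-- pv_equiv track=rewrite | github.com/OXERIS/web-sitedemo | score_calculator.py | calculate_certificate_skill_transferability_score
-- ===== SOURCE A (Python) =====
-- def calculate_certificate_skill_transferability_score(has_certificate, first_language_scores):
--     """
--     计算技能迁移因素 - 证书维度的得分。
--     :param has_certificate: str, 是否拥有加拿大职业资格证书，取值为 "yes" 或 "no"
--     :param first_language_scores: dict, 第一官方语言各项能力的等级，键为 'reading', 'writing', 'speaking', 'listening'
--     :return: int, 技能迁移因素 - 证书维度的得分
--     """
--     if has_certificate != 'yes':
--         return 0  # 没有资格证书，得分为 0
--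
--     # 检查第一官方语言各项能力是否达到 CLB 5 及以上
--     all_clb5_or_higher = all(
--         score in ["clb_5", "clb_6", "clb_7", "clb_8", "clb_9", "clb_10_or_more"] for score in first_language_scores.values()
--     )
--
--     if not all_clb5_or_higher:
--         return 0  # 任意一项低于 CLB 5，得分为 0
--
--     # 检查第一官方语言各项能力是否达到 CLB 7 及以上
--     all_clb7_or_higher = all(
--         score in ["clb_7", "clb_8", "clb_9", "clb_10_or_more"] for score in first_language_scores.values()
--     )
--
--     if all_clb7_or_higher:
--         return 50  # 四项能力均达到 CLB 7 或以上，得分为 50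
--     else:
--         return 25  # 至少一项在 CLB 5 或 CLB 6，得分为 25
-- ===== SOURCE B (Python) =====
-- _CLB_RANK = {"clb_5": 5, "clb_6": 6, "clb_7": 7, "clb_8": 8,
--              "clb_9": 9, "clb_10_or_more": 10}
--
--
-- def calculate_certificate_skill_transferability_score(has_certificate, first_language_scores):
--     if has_certificate != 'yes':
--         return 0
--     m = min((_CLB_RANK.get(v, 0) for v in first_language_scores.values()), default=11)
--     if m >= 7:
--         return 50
--     if m >= 5:
--         return 25
--     return 0
-- ===== Notes on version B (the rewrite author's own statement) =====
-- stated objective: simpler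
-- what changed: Replaces the two all()-over-string-set membership passes with one numeric pass: each level is mapped to a rank and a single min (default 11 for the empty dict) decides the 50/25/0 tier.
import Mathlib
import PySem

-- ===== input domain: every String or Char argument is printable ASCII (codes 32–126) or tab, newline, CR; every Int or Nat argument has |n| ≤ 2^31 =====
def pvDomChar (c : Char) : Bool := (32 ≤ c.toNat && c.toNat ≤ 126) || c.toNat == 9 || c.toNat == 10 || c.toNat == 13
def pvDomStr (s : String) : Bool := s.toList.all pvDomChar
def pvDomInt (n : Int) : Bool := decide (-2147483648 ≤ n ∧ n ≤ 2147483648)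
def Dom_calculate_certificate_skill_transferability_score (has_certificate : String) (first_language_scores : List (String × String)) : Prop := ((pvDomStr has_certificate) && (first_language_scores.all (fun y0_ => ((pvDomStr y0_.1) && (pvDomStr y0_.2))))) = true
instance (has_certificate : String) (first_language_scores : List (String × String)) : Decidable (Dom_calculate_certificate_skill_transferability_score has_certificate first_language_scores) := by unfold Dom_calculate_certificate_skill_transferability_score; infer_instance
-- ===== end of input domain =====

-- B replaces A's two all()-over-string-list membership passes by one numeric pass:
-- map each level to a rank and let a single min (default 11 on the empty dict) pick the 50/25/0 tier.

-- ===== PORT A =====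
def calculate_certificate_skill_transferability_score (has_certificate : String) (first_language_scores : List (String × String)) : Int :=
  if has_certificate ≠ "yes" then 0
  else
    let all_clb5_or_higher :=
      ((PySem.Dict.ofList first_language_scores).values).all
        (fun score => ["clb_5", "clb_6", "clb_7", "clb_8", "clb_9", "clb_10_or_more"].contains score)
    if ¬ all_clb5_or_higher then 0
    else
      let all_clb7_or_higher :=
        ((PySem.Dict.ofList first_language_scores).values).all
          (fun score => ["clb_7", "clb_8", "clb_9", "clb_10_or_more"].contains score)
      if all_clb7_or_higher then 50 else 25

-- ===== PORT B =====
-- the module-level _CLB_RANK dict of Source B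
def pvClbRank : PySem.Dict String Int :=
  PySem.Dict.ofList [("clb_5", 5), ("clb_6", 6), ("clb_7", 7), ("clb_8", 8), ("clb_9", 9), ("clb_10_or_more", 10)]

def calculate_certificate_skill_transferability_score_alt (has_certificate : String) (first_language_scores : List (String × String)) : Int :=
  if has_certificate ≠ "yes" then 0
  else
    let m := PySem.List.minD (((PySem.Dict.ofList first_language_scores).values).map (fun v => pvClbRank.getD v 0)) (fun x => x) 11
    if 7 ≤ m then 50
    else if 5 ≤ m then 25
    else 0

-- ===== PRECONDITION & SPEC =====
def Spec_calculate_certificate_skill_transferability_score (has_certificate : String) (first_language_scores : List (String × String)) (out : Int) : Prop := out = calculate_certificate_skill_transferability_score_alt has_certificate first_language_scores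
instance (has_certificate : String) (first_language_scores : List (String × String)) (out : Int) : Decidable (Spec_calculate_certificate_skill_transferability_score has_certificate first_language_scores out) := by unfold Spec_calculate_certificate_skill_transferability_score; infer_instance

-- ===== CLAIM (what is proved, stated in full; the proofs are below) =====
def Claim_equal_calculate_certificate_skill_transferability_score : Prop := ∀ (has_certificate : String) (first_language_scores : List (String × String)), Dom_calculate_certificate_skill_transferability_score has_certificate first_language_scores → Spec_calculate_certificate_skill_transferability_score has_certificate first_language_scores (calculate_certificate_skill_transferability_score has_certificate first_language_scores)

-- ===== LEMMAS AND PROOFS =====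

lemma pvRank_eq (v : String) : pvClbRank.getD v 0 =
    if "clb_5" = v then 5 else if "clb_6" = v then 6 else if "clb_7" = v then 7
    else if "clb_8" = v then 8 else if "clb_9" = v then 9 else if "clb_10_or_more" = v then 10 else 0 := by
  have h : pvClbRank = PySem.Dict.mk [("clb_5", 5), ("clb_6", 6), ("clb_7", 7), ("clb_8", 8), ("clb_9", 9), ("clb_10_or_more", 10)] := by decide
  rw [h]
  simp only [PySem.Dict.getD, PySem.Dict.get?_mk_cons, beq_iff_eq]
  split_ifs with h1 h2 h3 h4 h5 h6 <;> simp_all [PySem.Dict.get?]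

lemma pvRank_ge7 (v : String) :
    7 ≤ pvClbRank.getD v 0 ↔ (["clb_7", "clb_8", "clb_9", "clb_10_or_more"].contains v = true) := by
  rw [pvRank_eq]
  split_ifs with h1 h2 h3 h4 h5 h6 <;> try (subst_eqs; decide)
  simp only [List.contains_eq_mem, List.mem_cons, List.not_mem_nil, or_false, decide_eq_true_eq]
  constructor
  · omega
  · rintro (rfl | rfl | rfl | rfl) <;> simp_all

lemma pvRank_ge5 (v : String) :
    5 ≤ pvClbRank.getD v 0 ↔ (["clb_5", "clb_6", "clb_7", "clb_8", "clb_9", "clb_10_or_more"].contains v = true) := by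
  rw [pvRank_eq]
  split_ifs with h1 h2 h3 h4 h5 h6 <;> try (subst_eqs; decide)
  simp only [List.contains_eq_mem, List.mem_cons, List.not_mem_nil, or_false, decide_eq_true_eq]
  constructor
  · omega
  · rintro (rfl | rfl | rfl | rfl | rfl | rfl) <;> simp_all

lemma pv_foldl_abstract (f : Option Int → Int → Option Int)
    (hf : ∀ m z, f (some m) z = some (min m z)) :
    ∀ (ys : List Int) (a : Int), List.foldl f (some a) ys = some (List.foldl min a ys) := by
  intro ys
  induction ys with
  | nil => intro a; rfl
  | cons y ys ih => intro a; simp only [List.foldl, hf, ih]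

lemma pv_min?_cons (x : Int) (xs : List Int) :
    PySem.List.min? (x :: xs) (fun y => y) = some (List.foldl min x xs) := by
  simp only [PySem.List.min?, List.foldl]
  exact pv_foldl_abstract _ (by
    intro m z
    simp only [min_def]
    split_ifs <;> first | rfl | omega) xs x

lemma pv_le_foldl_min (k a : Int) (ys : List Int) :
    k ≤ List.foldl min a ys ↔ k ≤ a ∧ ∀ y ∈ ys, k ≤ y := by
  induction ys generalizing a with
  | nil => simp
  | cons y ys ih =>
      simp only [List.foldl, ih, List.mem_cons]
      constructor
      · rintro ⟨h1, h2⟩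
        refine ⟨le_trans h1 (min_le_left _ _), ?_⟩
        rintro z (rfl | hz)
        · exact le_trans h1 (min_le_right _ _)
        · exact h2 z hz
      · rintro ⟨h1, h2⟩
        exact ⟨le_min h1 (h2 y (Or.inl rfl)), fun z hz => h2 z (Or.inr hz)⟩

lemma pv_minD_ge (k : Int) (hk : k ≤ 11) (vs : List String) :
    k ≤ PySem.List.minD (vs.map (fun v => pvClbRank.getD v 0)) (fun x => x) 11 ↔
      ∀ v ∈ vs, k ≤ pvClbRank.getD v 0 := by
  cases vs with
  | nil => simpa [PySem.List.minD, PySem.List.min?] using hk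
  | cons v vs =>
      rw [List.map_cons, PySem.List.minD, pv_min?_cons, Option.getD_some, pv_le_foldl_min]
      constructor
      · rintro ⟨h1, h2⟩ z hz
        rcases List.mem_cons.mp hz with rfl | hz'
        · exact h1
        · exact h2 _ (List.mem_map.mpr ⟨z, hz', rfl⟩)
      · rintro h
        refine ⟨h v List.mem_cons_self, ?_⟩
        intro y hy
        rcases List.mem_map.mp hy with ⟨z, hz, rfl⟩
        exact h z (List.mem_cons_of_mem _ hz)

lemma pv_core (vs : List String) :
    (if ¬ (vs.all (fun score => ["clb_5", "clb_6", "clb_7", "clb_8", "clb_9", "clb_10_or_more"].contains score)) then (0 : Int)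
     else if vs.all (fun score => ["clb_7", "clb_8", "clb_9", "clb_10_or_more"].contains score) then 50 else 25)
    = (let m := PySem.List.minD (vs.map (fun v => pvClbRank.getD v 0)) (fun x => x) 11;
       if 7 ≤ m then (50 : Int) else if 5 ≤ m then 25 else 0) := by
  have h7 := pv_minD_ge 7 (by omega) vs
  have h5 := pv_minD_ge 5 (by omega) vs
  simp only [List.all_eq_true]
  by_cases hall7 : ∀ v ∈ vs, 7 ≤ pvClbRank.getD v 0
  · have hall5 : ∀ v ∈ vs, 5 ≤ pvClbRank.getD v 0 := fun v hv => le_trans (by omega) (hall7 v hv)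
    simp only [h7.mpr hall7, if_pos]
    rw [if_neg, if_pos]
    · intro v hv; exact (pvRank_ge7 v).mp (hall7 v hv)
    · simp only [not_not]; intro v hv; exact (pvRank_ge5 v).mp (hall5 v hv)
  · have h7' : ¬ 7 ≤ PySem.List.minD (vs.map (fun v => pvClbRank.getD v 0)) (fun x => x) 11 :=
      fun h => hall7 (h7.mp h)
    simp only [if_neg h7']
    by_cases hall5 : ∀ v ∈ vs, 5 ≤ pvClbRank.getD v 0
    · simp only [h5.mpr hall5, if_pos]
      rw [if_neg, if_neg]
      · intro h; exact hall7 (fun v hv => (pvRank_ge7 v).mpr (h v hv))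
      · simp only [not_not]
        intro v hv
        exact (pvRank_ge5 v).mp (hall5 v hv)
    · have h5' : ¬ 5 ≤ PySem.List.minD (vs.map (fun v => pvClbRank.getD v 0)) (fun x => x) 11 :=
        fun h => hall5 (h5.mp h)
      rw [if_neg h5', if_pos]
      intro hc
      exact hall5 (fun v hv => (pvRank_ge5 v).mpr (hc v hv))

-- ===== VERDICT (by name: the statement is the Claim_ definition above) =====
theorem calculate_certificate_skill_transferability_score_spec : Claim_equal_calculate_certificate_skill_transferability_score := by
  intro hc d _
  unfold Spec_calculate_certificate_skill_transferability_score
  unfold calculate_certificate_skill_transferability_score calculate_certificate_skill_transferability_score_alt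
  by_cases h : hc = "yes"
  · simp only [h, ne_eq, not_true_eq_false, if_false]
    simpa using pv_core ((PySem.Dict.ofList d).values)
  · simp [h]
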